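-- pv_equiv track=rewrite | github.com/p0dxD/Programming-language | Aditional class work/booth.py | create_matrix_with_new_point
-- ===== SOURCE A (Python) =====
-- def create_matrix_with_new_point(roomSize,createdMatrix, dimensions,target):
-- 	keyTarget, valueTarget = target.popitem()
-- 	createdMatrix = [[subelt.replace(keyTarget,'0') for subelt in individualList] for individualList in createdMatrix]
-- 	for key, value in dimensions.items():
-- 		if key is keyTarget:
-- 			for i in range(int(dimensions.get(key)[0])):
-- 				if (int(valueTarget[0])+i) >= int(roomSize[0]) or (int(valueTarget[0])+i) < 0:
-- 					return []
-- 				for j in range(int(dimensions.get(key)[1])):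
-- 					if (int(valueTarget[1])+j) >= int(roomSize[1]) or (int(valueTarget[1])+i) < 0 or createdMatrix[int(valueTarget[0])+i][int(valueTarget[1])+j] != '0':
-- 						return []
-- 					createdMatrix[int(valueTarget[0])+i][int(valueTarget[1])+j] = key
-- 	return createdMatrix
-- ===== SOURCE B (Python) =====
-- def create_matrix_with_new_point(roomSize, createdMatrix, dimensions, target):
--     keyTarget, valueTarget = target.popitem()
--     grid = [[cell.replace(keyTarget, '0') for cell in row] for row in createdMatrix]
--     if not any(key is keyTarget for key in dimensions):
--         return grid
--     h = int(dimensions[keyTarget][0])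
--     w = int(dimensions[keyTarget][1])
--     r0 = int(valueTarget[0])
--     c0 = int(valueTarget[1])
--     R = int(roomSize[0])
--     C = int(roomSize[1])
--     if any(not (0 <= r0 + i < R and 0 <= c0 + j < C) or grid[r0 + i][c0 + j] != '0'
--            for i in range(h) for j in range(w)):
--         return []
--     return [[keyTarget if r0 <= r < r0 + h and c0 <= c < c0 + w else cell
--              for c, cell in enumerate(row)] for r, row in enumerate(grid)]
-- ===== Notes on version B (the rewrite author's own statement) =====
-- stated objective: simpler
-- what changed: B keeps A's popitem/replace and the `is` identity test for the matching dimension key, but replaces A's interleaved mutate-while-checking nested loops by one pure validation pass over the whole footprint (bounds and overlap checked together per cell) followed by a comprehension that rebuilds the grid, instead of in-place writes; Pre_ excludes inputs where A raises, where a matching key longer than one character makes A's `is` test depend on string interning, and malformed size data that A only skips lazily.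
-- intended difference: On inputs whose matching dimensions entry has positive height, non-positive width and a row range leaving the room (and a non-empty matrix), A returns [] because it checks row bounds before noticing the footprint is empty, while B returns the cleared matrix unchanged — the intended result of placing a zero-width object. — e.g. on create_matrix_with_new_point(["1", "1"], [["0"]], [("a", ["2", "0"])], [("a", ["0", "0"])]): A returns [], B returns [["0"]]
-- outside the precondition, e.g. on create_matrix_with_new_point(['1'], [], {'a': ['0', 'y']}, {'a': ['p', 'q']}): A returns [], B raises ValueError; on create_matrix_with_new_point(['1', '2'], [['x']], {'a': ['1', '2']}, {'a': ['0', '0']}): A returns [], B returns []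
import Mathlib
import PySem

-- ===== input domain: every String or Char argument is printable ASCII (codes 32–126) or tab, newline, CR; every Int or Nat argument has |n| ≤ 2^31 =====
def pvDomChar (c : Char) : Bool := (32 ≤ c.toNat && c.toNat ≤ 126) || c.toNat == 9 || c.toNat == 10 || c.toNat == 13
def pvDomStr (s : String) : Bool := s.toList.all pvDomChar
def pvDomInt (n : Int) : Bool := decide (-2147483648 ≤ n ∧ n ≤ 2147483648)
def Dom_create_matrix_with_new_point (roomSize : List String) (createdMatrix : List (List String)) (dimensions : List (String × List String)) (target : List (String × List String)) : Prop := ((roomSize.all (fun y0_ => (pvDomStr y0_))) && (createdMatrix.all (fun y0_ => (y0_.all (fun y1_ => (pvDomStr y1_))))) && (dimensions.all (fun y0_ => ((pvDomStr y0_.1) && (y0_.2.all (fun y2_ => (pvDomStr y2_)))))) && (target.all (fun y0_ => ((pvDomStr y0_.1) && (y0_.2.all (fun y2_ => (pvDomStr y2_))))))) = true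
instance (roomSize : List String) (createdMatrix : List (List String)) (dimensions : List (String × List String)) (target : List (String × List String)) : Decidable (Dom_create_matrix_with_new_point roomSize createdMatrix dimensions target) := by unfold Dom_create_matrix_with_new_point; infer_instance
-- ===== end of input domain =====

-- B keeps A's popitem/replace and its `is` identity test, but validates the whole footprint in one
-- pure pass (bounds and overlap together) and rebuilds the grid with a comprehension instead of
-- mutating it while checking; objective: simpler.
-- Both A and B mutate `target` in place (popitem); the equivalence proved here is about the return value only.

-- ===== PORT A =====
-- int(xs[k]) : IndexError / ValueError become none
def pvIntAt (xs : List String) (k : Int) : Option Int :=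
  match PySem.List.pyGet? xs k with
  | none => none
  | some s => PySem.Int.ofStr? s

-- first-match association-list lookup = dict.get on the (unique-key) dict
def pvLookup (dims : List (String × List String)) (k : String) : Option (List String) :=
  match dims with
  | [] => none
  | (k', v) :: rest => if k' = k then some v else pvLookup rest k

-- the matrix-wide  [[subelt.replace(keyTarget,'0') for subelt in individualList] ...]  comprehension
def pvReplaceGrid (kT : String) (m : List (List String)) : List (List String) :=
  m.map (fun row => row.map (fun cell => PySem.Str.replace cell kT "0"))

-- grid[r][c] (Python index semantics; none = IndexError)
def pvGetCell? (g : List (List String)) (r c : Int) : Option String :=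
  match PySem.List.pyGet? g r with
  | none => none
  | some row => PySem.List.pyGet? row c

-- grid[r][c] = v (Python index semantics; none = IndexError)
def pvSetCell? (g : List (List String)) (r c : Int) (v : String) : Option (List (List String)) :=
  match PySem.List.pyGet? g r with
  | none => none
  | some row =>
    match PySem.List.pySet? row c v with
    | none => none
    | some row' => PySem.List.pySet? g r row'

-- A's inner `for j in range(...)` loop; outer none = exception, `some none` = `return []`
def pvA_loopJ (vT roomSize : List String) (key : String) (i : Int)
    (g : List (List String)) : List Int → Option (Option (List (List String)))
  | [] => some (some g)
  | j :: js =>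
    match pvIntAt vT 1, pvIntAt roomSize 1 with
    | some c0, some C =>
      if C ≤ c0 + j ∨ c0 + i < 0 then some none
      else
        match pvIntAt vT 0 with
        | some r0 =>
          match pvGetCell? g (r0 + i) (c0 + j) with
          | some cell =>
            if cell ≠ "0" then some none
            else
              match pvSetCell? g (r0 + i) (c0 + j) key with
              | some g' => pvA_loopJ vT roomSize key i g' js
              | none => none
          | none => none
        | none => none
    | _, _ => none

-- A's outer `for i in range(int(dimensions.get(key)[0]))` loop
def pvA_loopI (vT roomSize dv : List String) (key : String)
    (g : List (List String)) : List Int → Option (Option (List (List String)))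
  | [] => some (some g)
  | i :: is_ =>
    match pvIntAt vT 0, pvIntAt roomSize 0 with
    | some r0, some R =>
      if R ≤ r0 + i ∨ r0 + i < 0 then some none
      else
        match pvIntAt dv 1 with
        | some w =>
          match pvA_loopJ vT roomSize key i g (PySem.List.pyRange 0 w 1) with
          | some (some g') => pvA_loopI vT roomSize dv key g' is_
          | some none => some none
          | none => none
        | none => none
    | _, _ => none

-- A's `for key, value in dimensions.items()` loop.  Python compares `key is keyTarget` (object
-- identity); it is ported as string equality, and Pre_ restricts to inputs on which the two agree
-- (any dimensions key equal to keyTarget has length ≤ 1: such strings are interned by CPython).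
def pvA_dims (vT roomSize : List String) (kT : String) (dims0 : List (String × List String))
    (g : List (List String)) : List (String × List String) → Option (Option (List (List String)))
  | [] => some (some g)
  | (key, _value) :: rest =>
    if key = kT then
      match pvLookup dims0 key with
      | some dv =>
        match pvIntAt dv 0 with
        | some h =>
          match pvA_loopI vT roomSize dv key g (PySem.List.pyRange 0 h 1) with
          | some (some g') => pvA_dims vT roomSize kT dims0 g' rest
          | some none => some none
          | none => none
        | none => none
      | none => none
    else pvA_dims vT roomSize kT dims0 g rest

-- A's body after popitem; `some none` = Python's `return []`, `none` = an exception (outside Pre_)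
def pvA_main (roomSize : List String) (createdMatrix : List (List String)) (dimensions : List (String × List String)) (kT : String) (vT : List String) : List (List String) :=
  match pvA_dims vT roomSize kT dimensions (pvReplaceGrid kT createdMatrix) dimensions with
  | some (some g') => g'
  | _ => []

def create_matrix_with_new_point (roomSize : List String) (createdMatrix : List (List String)) (dimensions : List (String × List String)) (target : List (String × List String)) : List (List String) :=
  match target.getLast? with
  | none => []      -- target.popitem() raises KeyError (outside Pre_)
  | some (kT, vT) => pvA_main roomSize createdMatrix dimensions kT vT

-- ===== PORT B =====
-- grid[r][c] read, total form (Source B only reads cells that Pre_ guarantees exist)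
def pvCellD (g : List (List String)) (r c : Int) : String :=
  (pvGetCell? g r c).getD ""

-- B's body after popitem.  Source B's `any(key is keyTarget for key in dimensions)` + dict lookup is
-- ported as a first-match lookup with string equality; as for A, Pre_ restricts to inputs where
-- the `is` identity test agrees with equality (matching keys of length ≤ 1, interned by CPython).
def pvB_main (roomSize : List String) (createdMatrix : List (List String)) (dimensions : List (String × List String)) (kT : String) (vT : List String) : List (List String) :=
    let grid := pvReplaceGrid kT createdMatrix
    match pvLookup dimensions kT with
    | none => grid
    | some dv =>
      match pvIntAt dv 0, pvIntAt dv 1, pvIntAt vT 0, pvIntAt vT 1,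
            pvIntAt roomSize 0, pvIntAt roomSize 1 with
      | some h, some w, some r0, some c0, some R, some C =>
        if (List.range h.toNat).any (fun i => (List.range w.toNat).any (fun j =>
             (!decide (0 ≤ r0 + (i : Int) ∧ r0 + (i : Int) < R ∧ 0 ≤ c0 + (j : Int) ∧ c0 + (j : Int) < C))
             || (pvCellD grid (r0 + (i : Int)) (c0 + (j : Int)) != "0")))
        then []
        else (PySem.List.enumerate grid 0).map (fun p =>
               (PySem.List.enumerate p.2 0).map (fun q =>
                 if r0 ≤ p.1 ∧ p.1 < r0 + h ∧ c0 ≤ q.1 ∧ q.1 < c0 + w then kT else q.2))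
      | _, _, _, _, _, _ => []    -- an int() raised (outside Pre_)

def create_matrix_with_new_point_alt (roomSize : List String) (createdMatrix : List (List String)) (dimensions : List (String × List String)) (target : List (String × List String)) : List (List String) :=
  match target.getLast? with
  | none => []      -- target.popitem() raises KeyError (outside Pre_)
  | some (kT, vT) => pvB_main roomSize createdMatrix dimensions kT vT

-- ===== PRECONDITION & SPEC =====
-- When the last item of `target` matches a dimensions key, all six int() arguments must exist and
-- parse, and whenever the parsed footprint could touch the matrix (h,w > 0, r0,c0 ≥ 0) the declared
-- room must fit inside the matrix (rows ≥ R, every row ≥ C wide): outside this, A can raise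
-- (IndexError/ValueError) or return after lazily skipping data that B parses eagerly.
def pvSafe (roomSize : List String) (createdMatrix : List (List String)) (dv vT : List String) : Bool :=
  match pvIntAt dv 0 with
  | none => false
  | some h =>
    match pvIntAt dv 1 with
    | none => false
    | some w =>
      match pvIntAt vT 0 with
      | none => false
      | some r0 =>
        match pvIntAt vT 1 with
        | none => false
        | some c0 =>
          match pvIntAt roomSize 0 with
          | none => false
          | some R =>
            match pvIntAt roomSize 1 with
            | none => false
            | some C =>
              if 0 < h ∧ 0 < w ∧ 0 ≤ r0 ∧ 0 ≤ c0 then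
                decide (R ≤ (createdMatrix.length : Int)) &&
                  createdMatrix.all (fun row => decide (C ≤ (row.length : Int)))
              else true

def pvPreB (roomSize : List String) (createdMatrix : List (List String)) (dimensions : List (String × List String)) (target : List (String × List String)) : Bool :=
  match target.getLast? with
  | none => true
  | some (kT, vT) =>
    dimensions.all (fun p =>
      if p.1 = kT then
        decide (kT.toList.length ≤ 1) && pvSafe roomSize createdMatrix p.2 vT
      else true)

-- Pre_ excludes: empty target (popitem raises KeyError); duplicate dimensions keys (impossible for a
-- real Python dict); a dimensions key equal to target's key but longer than one character, where A's
-- `is` comparison depends on string interning rather than on the values; and malformed/short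
-- size data reachable by the matching entry, on which A raises or returns only by lazily skipping it.
def Pre_create_matrix_with_new_point (roomSize : List String) (createdMatrix : List (List String)) (dimensions : List (String × List String)) (target : List (String × List String)) : Prop :=
  target ≠ [] ∧
  List.Pairwise (fun a b => a.1 ≠ b.1) dimensions ∧
  pvPreB roomSize createdMatrix dimensions target = true

instance (roomSize : List String) (createdMatrix : List (List String)) (dimensions : List (String × List String)) (target : List (String × List String)) : Decidable (Pre_create_matrix_with_new_point roomSize createdMatrix dimensions target) := by unfold Pre_create_matrix_with_new_point; infer_instance

def pvWitness_create_matrix_with_new_point : List String × List (List String) × (List (String × List String)) × (List (String × List String)) :=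
  (["2", "2"], [["0", "0"], ["0", "0"]], [("a", ["1", "1"])], [("a", ["0", "0"])])

-- On inputs whose matching dimensions entry has positive height, non-positive width and a row range
-- leaving the room (and a non-empty matrix), A returns [] because it checks row bounds before
-- noticing the footprint is empty, while B returns the cleared matrix unchanged — the intended
-- result of placing a zero-width object.
def pvDiffCore (roomSize : List String) (createdMatrix : List (List String)) (dimensions : List (String × List String)) (kT : String) (vT : List String) : Bool :=
  decide (createdMatrix ≠ []) &&
  ((List.lookup kT dimensions).elim false (fun dv =>
    (dv[0]?.bind PySem.Int.ofStr?).elim false (fun h =>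
    (dv[1]?.bind PySem.Int.ofStr?).elim false (fun w =>
    (vT[0]?.bind PySem.Int.ofStr?).elim false (fun r0 =>
    (roomSize[0]?.bind PySem.Int.ofStr?).elim false (fun R =>
      decide (0 < h) && decide (w ≤ 0) && (decide (r0 < 0) || decide (R < r0 + h))))))))

def pvDiffB (roomSize : List String) (createdMatrix : List (List String)) (dimensions : List (String × List String)) (target : List (String × List String)) : Bool :=
  target.getLast?.elim false (fun kv => pvDiffCore roomSize createdMatrix dimensions kv.1 kv.2)

def D_create_matrix_with_new_point (roomSize : List String) (createdMatrix : List (List String)) (dimensions : List (String × List String)) (target : List (String × List String)) : Prop :=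
  pvDiffB roomSize createdMatrix dimensions target = true

instance (roomSize : List String) (createdMatrix : List (List String)) (dimensions : List (String × List String)) (target : List (String × List String)) : Decidable (D_create_matrix_with_new_point roomSize createdMatrix dimensions target) := by unfold D_create_matrix_with_new_point; infer_instance

def Spec_create_matrix_with_new_point (roomSize : List String) (createdMatrix : List (List String)) (dimensions : List (String × List String)) (target : List (String × List String)) (out : List (List String)) : Prop := ¬ D_create_matrix_with_new_point roomSize createdMatrix dimensions target → out = create_matrix_with_new_point_alt roomSize createdMatrix dimensions target
instance (roomSize : List String) (createdMatrix : List (List String)) (dimensions : List (String × List String)) (target : List (String × List String)) (out : List (List String)) : Decidable (Spec_create_matrix_with_new_point roomSize createdMatrix dimensions target out) := by unfold Spec_create_matrix_with_new_point; infer_instance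

def pvDiffWitness_create_matrix_with_new_point : List String × List (List String) × (List (String × List String)) × (List (String × List String)) :=
  (["1", "1"], [["0"]], [("a", ["2", "0"])], [("a", ["0", "0"])])

def pvDiffWitnessOut_create_matrix_with_new_point : (List (List String)) × (List (List String)) :=
  ([], [["0"]])

-- ===== CLAIM (what is proved, stated in full; the proofs are below) =====
def Claim_unchanged_create_matrix_with_new_point : Prop := ∀ (roomSize : List String) (createdMatrix : List (List String)) (dimensions : List (String × List String)) (target : List (String × List String)), Dom_create_matrix_with_new_point roomSize createdMatrix dimensions target → Pre_create_matrix_with_new_point roomSize createdMatrix dimensions target → Spec_create_matrix_with_new_point roomSize createdMatrix dimensions target (create_matrix_with_new_point roomSize createdMatrix dimensions target)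

def Claim_changed_create_matrix_with_new_point : Prop := Dom_create_matrix_with_new_point (pvDiffWitness_create_matrix_with_new_point.1) (pvDiffWitness_create_matrix_with_new_point.2.1) (pvDiffWitness_create_matrix_with_new_point.2.2.1) (pvDiffWitness_create_matrix_with_new_point.2.2.2) ∧ Pre_create_matrix_with_new_point (pvDiffWitness_create_matrix_with_new_point.1) (pvDiffWitness_create_matrix_with_new_point.2.1) (pvDiffWitness_create_matrix_with_new_point.2.2.1) (pvDiffWitness_create_matrix_with_new_point.2.2.2) ∧ D_create_matrix_with_new_point (pvDiffWitness_create_matrix_with_new_point.1) (pvDiffWitness_create_matrix_with_new_point.2.1) (pvDiffWitness_create_matrix_with_new_point.2.2.1) (pvDiffWitness_create_matrix_with_new_point.2.2.2) ∧ create_matrix_with_new_point (pvDiffWitness_create_matrix_with_new_point.1) (pvDiffWitness_create_matrix_with_new_point.2.1) (pvDiffWitness_create_matrix_with_new_point.2.2.1) (pvDiffWitness_create_matrix_with_new_point.2.2.2) = pvDiffWitnessOut_create_matrix_with_new_point.1 ∧ create_matrix_with_new_point_alt (pvDiffWitness_create_matrix_with_new_point.1) (pvDiffWitness_create_matrix_with_new_point.2.1)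 (pvDiffWitness_create_matrix_with_new_point.2.2.1) (pvDiffWitness_create_matrix_with_new_point.2.2.2) = pvDiffWitnessOut_create_matrix_with_new_point.2 ∧ pvDiffWitnessOut_create_matrix_with_new_point.1 ≠ pvDiffWitnessOut_create_matrix_with_new_point.2

def Claim_exact_create_matrix_with_new_point : Prop := ∀ (roomSize : List String) (createdMatrix : List (List String)) (dimensions : List (String × List String)) (target : List (String × List String)), Dom_create_matrix_with_new_point roomSize createdMatrix dimensions target → Pre_create_matrix_with_new_point roomSize createdMatrix dimensions target → D_create_matrix_with_new_point roomSize createdMatrix dimensions target → create_matrix_with_new_point roomSize createdMatrix dimensions target ≠ create_matrix_with_new_point_alt roomSize createdMatrix dimensions target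

-- ===== LEMMAS AND PROOFS =====

-- Nat-indexed proof-side accessors
def pvCellN (g : List (List String)) (r c : Nat) : String := (g.getD r []).getD c ""
def pvSetN (g : List (List String)) (r c : Nat) (v : String) : List (List String) :=
  g.set r ((g.getD r []).set c v)

def pvWriteSegN (g : List (List String)) (r c : Nat) (v : String) : Nat → List (List String)
  | 0 => g
  | n + 1 => pvWriteSegN (pvSetN g r c v) r (c + 1) v n

def pvWriteBlockN (g : List (List String)) (r c : Nat) (n : Nat) (v : String) : Nat → List (List String)
  | 0 => g
  | m + 1 => pvWriteBlockN (pvWriteSegN g r c v n) (r + 1) c n v m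

-- ---- lookup / dims-loop lemmas ----

theorem pvLookup_eq_none_iff (dims : List (String × List String)) (k : String) :
    pvLookup dims k = none ↔ ∀ p ∈ dims, p.1 ≠ k := by
  induction dims with
  | nil => simp [pvLookup]
  | cons p rest ih =>
    obtain ⟨k', v⟩ := p
    by_cases h : k' = k <;> simp [pvLookup, h, ih]

theorem pvLookup_eq_some (dims : List (String × List String)) (k : String) (dv : List String)
    (h : pvLookup dims k = some dv) :
    ∃ pre post, dims = pre ++ (k, dv) :: post ∧ ∀ p ∈ pre, p.1 ≠ k := by
  induction dims with
  | nil => simp [pvLookup] at h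
  | cons p rest ih =>
    obtain ⟨k', v⟩ := p
    by_cases hk : k' = k
    · subst hk
      simp [pvLookup] at h
      exact ⟨[], rest, by simp [h], by simp⟩
    · simp [pvLookup, hk] at h
      obtain ⟨pre, post, heq, hpre⟩ := ih h
      exact ⟨(k', v) :: pre, post, by simp [heq], by
        intro p hp
        rcases List.mem_cons.mp hp with h1 | h1
        · simp [h1, hk]
        · exact hpre p h1⟩

theorem pvA_dims_skip (vT roomSize : List String) (kT : String)
    (dims0 : List (String × List String)) (g : List (List String))
    (entries : List (String × List String)) (h : ∀ p ∈ entries, p.1 ≠ kT) :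
    pvA_dims vT roomSize kT dims0 g entries = some (some g) := by
  induction entries with
  | nil => rfl
  | cons p rest ih =>
    obtain ⟨key, v⟩ := p
    have hk : key ≠ kT := h (key, v) (by simp)
    simp only [pvA_dims, if_neg hk]
    exact ih (fun p hp => h p (List.mem_cons_of_mem _ hp))

theorem pvA_dims_append (vT roomSize : List String) (kT : String)
    (dims0 : List (String × List String)) (g : List (List String))
    (pre rest : List (String × List String)) (h : ∀ p ∈ pre, p.1 ≠ kT) :
    pvA_dims vT roomSize kT dims0 g (pre ++ rest) = pvA_dims vT roomSize kT dims0 g rest := by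
  induction pre with
  | nil => rfl
  | cons p pre' ih =>
    obtain ⟨key, v⟩ := p
    have hk : key ≠ kT := h (key, v) (by simp)
    simp only [List.cons_append, pvA_dims, if_neg hk]
    exact ih (fun p hp => h p (List.mem_cons_of_mem _ hp))

-- ---- cell access / update lemmas ----

theorem pvCellD_nonneg (g : List (List String)) (r c : Int) (hr : 0 ≤ r) (hc : 0 ≤ c) :
    pvCellD g r c = pvCellN g r.toNat c.toNat := by
  unfold pvCellD pvGetCell? pvCellN
  rw [PySem.List.pyGet?_of_nonneg g hr]
  cases hrow : g[r.toNat]? with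
  | none =>
    simp [List.getD_eq_getElem?_getD, hrow]
  | some row =>
    simp [PySem.List.pyGet?_of_nonneg row hc, List.getD_eq_getElem?_getD, hrow]

theorem pvGetCell?_in (g : List (List String)) (r c : Int) (hr : 0 ≤ r)
    (hr2 : r.toNat < g.length) (hc : 0 ≤ c) (hc2 : c.toNat < (g.getD r.toNat []).length) :
    pvGetCell? g r c = some (pvCellN g r.toNat c.toNat) := by
  unfold pvGetCell? pvCellN
  have hrowD : g.getD r.toNat [] = g[r.toNat] := List.getD_eq_getElem _ _ hr2
  rw [hrowD] at hc2
  rw [PySem.List.pyGet?_of_nonneg g hr, List.getElem?_eq_getElem hr2]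
  simp [PySem.List.pyGet?_of_nonneg g[r.toNat] hc, hr2, hc2]

theorem pvSetCell?_in (g : List (List String)) (r c : Int) (v : String) (hr : 0 ≤ r)
    (hr2 : r.toNat < g.length) (hc : 0 ≤ c) (hc2 : c.toNat < (g.getD r.toNat []).length) :
    pvSetCell? g r c v = some (pvSetN g r.toNat c.toNat v) := by
  unfold pvSetCell? pvSetN
  have hrowD : g.getD r.toNat [] = g[r.toNat] := List.getD_eq_getElem _ _ hr2
  rw [hrowD] at hc2
  rw [PySem.List.pyGet?_of_nonneg g hr, List.getElem?_eq_getElem hr2]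
  have h1 : PySem.List.pySet? g[r.toNat] c v = some (g[r.toNat].set c.toNat v) := by
    have hcc : c = ((c.toNat : Nat) : Int) := (Int.toNat_of_nonneg hc).symm
    rw [hcc]; exact PySem.List.pySet?_natCast _ _ _ hc2
  have h2 : ∀ row' : List String, PySem.List.pySet? g r row' = some (g.set r.toNat row') := by
    intro row'
    have hrr : r = ((r.toNat : Nat) : Int) := (Int.toNat_of_nonneg hr).symm
    rw [hrr]
    exact PySem.List.pySet?_natCast g r.toNat row' hr2
  simp [h1, h2, List.getElem?_eq_getElem hr2]

theorem length_pvSetN (g : List (List String)) (r c : Nat) (v : String) :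
    (pvSetN g r c v).length = g.length := by
  simp [pvSetN]

theorem getD_pvSetN_ne (g : List (List String)) (r c : Nat) (v : String) (r' : Nat)
    (h : r' ≠ r) : (pvSetN g r c v).getD r' [] = g.getD r' [] := by
  simp [pvSetN, List.getD_eq_getElem?_getD, List.getElem?_set_ne (fun he => h he.symm)]

theorem getD_pvSetN_self (g : List (List String)) (r c : Nat) (v : String)
    (h : r < g.length) : (pvSetN g r c v).getD r [] = (g.getD r []).set c v := by
  simp [pvSetN, List.getD_eq_getElem?_getD, h]

theorem rowlen_pvSetN (g : List (List String)) (r c : Nat) (v : String) (r' : Nat) :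
    ((pvSetN g r c v).getD r' []).length = (g.getD r' []).length := by
  by_cases hr : r' = r
  · subst hr
    by_cases h : r' < g.length
    · rw [getD_pvSetN_self _ _ _ _ h, List.length_set]
    · have hset : pvSetN g r' c v = g := by
        unfold pvSetN; exact List.set_eq_of_length_le (by omega)
      rw [hset]
  · rw [getD_pvSetN_ne _ _ _ _ _ hr]

theorem pvCellN_pvSetN_ne (g : List (List String)) (r c : Nat) (v : String) (r' c' : Nat)
    (h : r' ≠ r ∨ c' ≠ c) : pvCellN (pvSetN g r c v) r' c' = pvCellN g r' c' := by
  rcases h with h | h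
  · unfold pvCellN
    rw [getD_pvSetN_ne _ _ _ _ _ h]
  · by_cases hr : r' = r
    · subst hr
      by_cases hlen : r' < g.length
      · unfold pvCellN
        rw [getD_pvSetN_self _ _ _ _ hlen]
        simp [List.getD_eq_getElem?_getD, List.getElem?_set_ne (fun he => h he.symm)]
      · have hset : pvSetN g r' c v = g := by
          unfold pvSetN; exact List.set_eq_of_length_le (by omega)
        rw [hset]
    · unfold pvCellN
      rw [getD_pvSetN_ne _ _ _ _ _ hr]

theorem pvCellN_pvSetN_self (g : List (List String)) (r c : Nat) (v : String)
    (hr : r < g.length) (hc : c < (g.getD r []).length) :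
    pvCellN (pvSetN g r c v) r c = v := by
  unfold pvCellN
  rw [getD_pvSetN_self _ _ _ _ hr]
  have hlen : c < ((g.getD r []).set c v).length := by simpa using hc
  rw [List.getD_eq_getElem _ _ hlen]
  simp

-- ---- write-segment lemmas ----

theorem length_pvWriteSegN (r c : Nat) (v : String) :
    ∀ (n : Nat) (g : List (List String)), (pvWriteSegN g r c v n).length = g.length := by
  intro n
  induction n generalizing c with
  | zero => intro g; rfl
  | succ n ih => intro g; simp only [pvWriteSegN]; rw [ih, length_pvSetN]

theorem getD_pvWriteSegN_ne (r : Nat) (v : String) (r' : Nat) (h : r' ≠ r) :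
    ∀ (n c : Nat) (g : List (List String)),
      (pvWriteSegN g r c v n).getD r' [] = g.getD r' [] := by
  intro n
  induction n with
  | zero => intro c g; rfl
  | succ n ih => intro c g; simp only [pvWriteSegN]; rw [ih, getD_pvSetN_ne _ _ _ _ _ h]

theorem rowlen_pvWriteSegN (r : Nat) (v : String) (r' : Nat) :
    ∀ (n c : Nat) (g : List (List String)),
      ((pvWriteSegN g r c v n).getD r' []).length = (g.getD r' []).length := by
  intro n
  induction n with
  | zero => intro c g; rfl
  | succ n ih => intro c g; simp only [pvWriteSegN]; rw [ih, rowlen_pvSetN]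

theorem pvCellN_pvWriteSegN_ne_row (r : Nat) (v : String) (r' c' : Nat) (h : r' ≠ r) :
    ∀ (n c : Nat) (g : List (List String)),
      pvCellN (pvWriteSegN g r c v n) r' c' = pvCellN g r' c' := by
  intro n c g
  unfold pvCellN
  rw [getD_pvWriteSegN_ne _ _ _ h]

theorem pvCellN_pvWriteSegN_out_col (r : Nat) (v : String) (c' : Nat) :
    ∀ (n c : Nat) (g : List (List String)), (c' < c ∨ c + n ≤ c') →
      pvCellN (pvWriteSegN g r c v n) r c' = pvCellN g r c' := by
  intro n
  induction n with
  | zero => intro c g _; rfl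
  | succ n ih =>
    intro c g h
    simp only [pvWriteSegN]
    rw [ih (c + 1) _ (by omega), pvCellN_pvSetN_ne _ _ _ _ _ _ (Or.inr (by omega))]

theorem pvCellN_pvWriteSegN_in (r : Nat) (v : String) (c' : Nat) :
    ∀ (n c : Nat) (g : List (List String)), c ≤ c' → c' < c + n →
      r < g.length → c' < (g.getD r []).length →
      pvCellN (pvWriteSegN g r c v n) r c' = v := by
  intro n
  induction n with
  | zero => intro c g h1 h2; omega
  | succ n ih =>
    intro c g h1 h2 hr hc
    simp only [pvWriteSegN]
    by_cases hcc : c' = c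
    · subst hcc
      rw [pvCellN_pvWriteSegN_out_col _ _ _ _ _ _ (Or.inl (by omega))]
      exact pvCellN_pvSetN_self _ _ _ _ hr hc
    · exact ih (c + 1) _ (by omega) (by omega)
        (by rw [length_pvSetN]; exact hr)
        (by rw [rowlen_pvSetN]; exact hc)

-- ---- write-block lemmas ----

theorem length_pvWriteBlockN (c n : Nat) (v : String) :
    ∀ (m r : Nat) (g : List (List String)), (pvWriteBlockN g r c n v m).length = g.length := by
  intro m
  induction m with
  | zero => intro r g; rfl
  | succ m ih => intro r g; simp only [pvWriteBlockN]; rw [ih, length_pvWriteSegN]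

theorem rowlen_pvWriteBlockN (c n : Nat) (v : String) (r' : Nat) :
    ∀ (m r : Nat) (g : List (List String)),
      ((pvWriteBlockN g r c n v m).getD r' []).length = (g.getD r' []).length := by
  intro m
  induction m with
  | zero => intro r g; rfl
  | succ m ih => intro r g; simp only [pvWriteBlockN]; rw [ih, rowlen_pvWriteSegN]

theorem pvCellN_pvWriteBlockN_out_row (c n : Nat) (v : String) (r' c' : Nat) :
    ∀ (m r : Nat) (g : List (List String)), (r' < r ∨ r + m ≤ r') →
      pvCellN (pvWriteBlockN g r c n v m) r' c' = pvCellN g r' c' := by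
  intro m
  induction m with
  | zero => intro r g _; rfl
  | succ m ih =>
    intro r g h
    simp only [pvWriteBlockN]
    rw [ih (r + 1) _ (by omega), pvCellN_pvWriteSegN_ne_row _ _ _ _ (by omega)]

theorem pvCellN_pvWriteBlockN_out_col (c n : Nat) (v : String) (r' c' : Nat)
    (h : c' < c ∨ c + n ≤ c') :
    ∀ (m r : Nat) (g : List (List String)),
      pvCellN (pvWriteBlockN g r c n v m) r' c' = pvCellN g r' c' := by
  intro m
  induction m with
  | zero => intro r g; rfl
  | succ m ih =>
    intro r g
    simp only [pvWriteBlockN]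
    rw [ih]
    by_cases hr : r' = r
    · subst hr; rw [pvCellN_pvWriteSegN_out_col _ _ _ _ _ _ h]
    · rw [pvCellN_pvWriteSegN_ne_row _ _ _ _ hr]

theorem pvCellN_pvWriteBlockN_in (c n : Nat) (v : String) (r' c' : Nat) :
    ∀ (m r : Nat) (g : List (List String)), r ≤ r' → r' < r + m → c ≤ c' → c' < c + n →
      r' < g.length → c' < (g.getD r' []).length →
      pvCellN (pvWriteBlockN g r c n v m) r' c' = v := by
  intro m
  induction m with
  | zero => intro r g h1 h2; omega
  | succ m ih =>
    intro r g h1 h2 h3 h4 hr hc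
    simp only [pvWriteBlockN]
    by_cases hrr : r' = r
    · rw [pvCellN_pvWriteBlockN_out_row _ _ _ _ _ m (r + 1) _ (Or.inl (by omega))]
      rw [hrr]
      exact pvCellN_pvWriteSegN_in _ _ _ _ _ _ h3 h4 (hrr ▸ hr) (hrr ▸ hc)
    · exact ih (r + 1) _ (by omega) (by omega) h3 h4
        (by rw [length_pvWriteSegN]; exact hr)
        (by rw [rowlen_pvWriteSegN]; exact hc)

-- ---- inner loop (columns) ----

theorem pvA_loopJ_clean (vT roomSize : List String) (key : String) (i r0 c0 C w : Int)
    (hc0 : pvIntAt vT 1 = some c0) (hC : pvIntAt roomSize 1 = some C)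
    (hr0 : pvIntAt vT 0 = some r0)
    (hi : 0 ≤ i) (hr0i : 0 ≤ r0 + i) (h0c : 0 ≤ c0) (hCw : c0 + w ≤ C) :
    ∀ (n : Nat) (b : Int) (g : List (List String)), 0 ≤ b → b + (n : Int) = w →
      (r0 + i).toNat < g.length →
      C ≤ ((g.getD (r0 + i).toNat []).length : Int) →
      (∀ k, k < n → pvCellN g (r0 + i).toNat ((c0 + b).toNat + k) = "0") →
      pvA_loopJ vT roomSize key i g (PySem.List.pyRange b w 1) =
        some (some (pvWriteSegN g (r0 + i).toNat (c0 + b).toNat key n)) := by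
  intro n
  induction n with
  | zero =>
    intro b g hb hbw _ _ _
    rw [PySem.List.pyRange_one_eq_nil (by omega)]
    rfl
  | succ n ih =>
    intro b g hb hbw hlen hrow hclean
    rw [PySem.List.pyRange_one_cons (by omega)]
    simp only [pvA_loopJ, hc0, hC, hr0]
    rw [if_neg (by omega)]
    have hc2 : (c0 + b).toNat < (g.getD (r0 + i).toNat []).length := by omega
    simp only [pvGetCell?_in g (r0 + i) (c0 + b) (by omega) hlen (by omega) hc2]
    have h0 : pvCellN g (r0 + i).toNat ((c0 + b).toNat) = "0" := by
      have := hclean 0 (by omega); simpa using this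
    rw [h0, if_neg (by simp)]
    simp only [pvSetCell?_in g (r0 + i) (c0 + b) key (by omega) hlen (by omega) hc2]
    rw [ih (b + 1) (pvSetN g (r0 + i).toNat (c0 + b).toNat key) (by omega) (by omega)
      (by rw [length_pvSetN]; exact hlen)
      (by rw [rowlen_pvSetN]; exact hrow)
      (by
        intro k hk
        have heq : (c0 + (b + 1)).toNat + k = (c0 + b).toNat + (k + 1) := by omega
        rw [heq, pvCellN_pvSetN_ne _ _ _ _ _ _ (Or.inr (by omega))]
        exact hclean (k + 1) (by omega))]
    have : (c0 + (b + 1)).toNat = (c0 + b).toNat + 1 := by omega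
    simp only [pvWriteSegN, this]

theorem pvA_loopJ_dirty (vT roomSize : List String) (key : String) (i r0 c0 C w : Int)
    (hc0 : pvIntAt vT 1 = some c0) (hC : pvIntAt roomSize 1 = some C)
    (hr0 : pvIntAt vT 0 = some r0)
    (hi : 0 ≤ i) (hr0i : 0 ≤ r0 + i) (h0c : 0 ≤ c0) (hCw : c0 + w ≤ C) :
    ∀ (n : Nat) (b : Int) (g : List (List String)), 0 ≤ b → b + (n : Int) = w →
      (r0 + i).toNat < g.length →
      C ≤ ((g.getD (r0 + i).toNat []).length : Int) →
      (∃ k, k < n ∧ pvCellN g (r0 + i).toNat ((c0 + b).toNat + k) ≠ "0") →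
      pvA_loopJ vT roomSize key i g (PySem.List.pyRange b w 1) = some none := by
  intro n
  induction n with
  | zero =>
    intro b g hb hbw _ _ hdirty
    obtain ⟨k, hk, _⟩ := hdirty
    omega
  | succ n ih =>
    intro b g hb hbw hlen hrow hdirty
    rw [PySem.List.pyRange_one_cons (by omega)]
    simp only [pvA_loopJ, hc0, hC, hr0]
    rw [if_neg (by omega)]
    have hc2 : (c0 + b).toNat < (g.getD (r0 + i).toNat []).length := by omega
    simp only [pvGetCell?_in g (r0 + i) (c0 + b) (by omega) hlen (by omega) hc2]
    by_cases h0 : pvCellN g (r0 + i).toNat ((c0 + b).toNat) = "0"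
    · rw [h0, if_neg (by simp)]
      simp only [pvSetCell?_in g (r0 + i) (c0 + b) key (by omega) hlen (by omega) hc2]
      exact ih (b + 1) (pvSetN g (r0 + i).toNat (c0 + b).toNat key) (by omega) (by omega)
        (by rw [length_pvSetN]; exact hlen)
        (by rw [rowlen_pvSetN]; exact hrow)
        (by
          obtain ⟨k, hk, hne⟩ := hdirty
          have hk0 : k ≠ 0 := by
            intro h; subst h; simp only [Nat.add_zero] at hne; exact hne h0
          refine ⟨k - 1, by omega, ?_⟩
          have heq : (c0 + (b + 1)).toNat + (k - 1) = (c0 + b).toNat + k := by omega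
          rw [heq, pvCellN_pvSetN_ne _ _ _ _ _ _ (Or.inr (by omega))]
          exact hne)
    · rw [if_pos h0]

theorem pvA_loopJ_bound (vT roomSize : List String) (key : String) (i r0 c0 C w : Int)
    (hc0 : pvIntAt vT 1 = some c0) (hC : pvIntAt roomSize 1 = some C)
    (hr0 : pvIntAt vT 0 = some r0)
    (hi : 0 ≤ i) (hr0i : 0 ≤ r0 + i) (h0c : 0 ≤ c0) (hCw : C < c0 + w) :
    ∀ (n : Nat) (b : Int) (g : List (List String)), 0 ≤ b → b + (n : Int) = w → b < w →
      (r0 + i).toNat < g.length →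
      C ≤ ((g.getD (r0 + i).toNat []).length : Int) →
      pvA_loopJ vT roomSize key i g (PySem.List.pyRange b w 1) = some none := by
  intro n
  induction n with
  | zero => intro b g hb hbw hblt; omega
  | succ n ih =>
    intro b g hb hbw hblt hlen hrow
    rw [PySem.List.pyRange_one_cons (by omega)]
    simp only [pvA_loopJ, hc0, hC, hr0]
    by_cases hcb : C ≤ c0 + b
    · rw [if_pos (Or.inl hcb)]
    · rw [if_neg (by omega)]
      have hc2 : (c0 + b).toNat < (g.getD (r0 + i).toNat []).length := by omega
      simp only [pvGetCell?_in g (r0 + i) (c0 + b) (by omega) hlen (by omega) hc2]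
      by_cases h0 : pvCellN g (r0 + i).toNat ((c0 + b).toNat) = "0"
      · rw [h0, if_neg (by simp)]
        simp only [pvSetCell?_in g (r0 + i) (c0 + b) key (by omega) hlen (by omega) hc2]
        exact ih (b + 1) (pvSetN g (r0 + i).toNat (c0 + b).toNat key) (by omega) (by omega)
          (by omega)
          (by rw [length_pvSetN]; exact hlen)
          (by rw [rowlen_pvSetN]; exact hrow)
      · rw [if_pos h0]

theorem pvA_loopJ_c0neg (vT roomSize : List String) (key : String) (i c0 C w : Int)
    (hc0 : pvIntAt vT 1 = some c0) (hC : pvIntAt roomSize 1 = some C)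
    (hneg : c0 + i < 0) (hw : 0 < w) (g : List (List String)) :
    pvA_loopJ vT roomSize key i g (PySem.List.pyRange 0 w 1) = some none := by
  rw [PySem.List.pyRange_one_cons (by omega)]
  simp only [pvA_loopJ, hc0, hC]
  rw [if_pos (Or.inr hneg)]

-- ---- outer loop (rows) ----

theorem pvA_loopI_neg (vT roomSize dv : List String) (key : String) (r0 R h : Int)
    (hr0 : pvIntAt vT 0 = some r0) (hR : pvIntAt roomSize 0 = some R)
    (h0h : 0 < h) (hneg : r0 < 0) (g : List (List String)) :
    pvA_loopI vT roomSize dv key g (PySem.List.pyRange 0 h 1) = some none := by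
  rw [PySem.List.pyRange_one_cons (by omega)]
  simp only [pvA_loopI, hr0, hR]
  rw [if_pos (Or.inr (by omega))]

theorem pvA_loopI_wle_fail (vT roomSize dv : List String) (key : String) (r0 R w h : Int)
    (hr0 : pvIntAt vT 0 = some r0) (hR : pvIntAt roomSize 0 = some R)
    (hw : pvIntAt dv 1 = some w) (hwle : w ≤ 0) (h0r : 0 ≤ r0) :
    ∀ (m : Nat) (a : Int) (g : List (List String)), 0 ≤ a → a + (m : Int) = h →
      r0 + a ≤ R → R < r0 + h →
      pvA_loopI vT roomSize dv key g (PySem.List.pyRange a h 1) = some none := by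
  intro m
  induction m with
  | zero => intro a g ha ham hle hlt; omega
  | succ m ih =>
    intro a g ha ham hle hlt
    rw [PySem.List.pyRange_one_cons (by omega)]
    simp only [pvA_loopI, hr0, hR]
    by_cases hfail : R ≤ r0 + a
    · rw [if_pos (Or.inl hfail)]
    · rw [if_neg (by omega)]
      simp only [hw]
      rw [PySem.List.pyRange_one_eq_nil (by omega : w ≤ (0 : Int))]
      exact ih (a + 1) g (by omega) (by omega) (by omega) hlt

theorem pvA_loopI_c0neg (vT roomSize dv : List String) (key : String) (r0 R c0 C w h : Int)
    (hr0 : pvIntAt vT 0 = some r0) (hR : pvIntAt roomSize 0 = some R)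
    (hc0 : pvIntAt vT 1 = some c0) (hC : pvIntAt roomSize 1 = some C)
    (hw : pvIntAt dv 1 = some w)
    (h0h : 0 < h) (h0w : 0 < w) (h0r : 0 ≤ r0) (hc0neg : c0 < 0) (g : List (List String)) :
    pvA_loopI vT roomSize dv key g (PySem.List.pyRange 0 h 1) = some none := by
  rw [PySem.List.pyRange_one_cons (by omega)]
  simp only [pvA_loopI, hr0, hR]
  by_cases hfail : R ≤ r0 + 0
  · rw [if_pos (Or.inl hfail)]
  · rw [if_neg (by omega)]
    simp only [hw]
    rw [pvA_loopJ_c0neg vT roomSize key 0 c0 C w hc0 hC (by omega) h0w g]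

theorem pvA_loopI_colbound (vT roomSize dv : List String) (key : String) (r0 R c0 C w h : Int)
    (hr0 : pvIntAt vT 0 = some r0) (hR : pvIntAt roomSize 0 = some R)
    (hc0 : pvIntAt vT 1 = some c0) (hC : pvIntAt roomSize 1 = some C)
    (hw : pvIntAt dv 1 = some w)
    (h0h : 0 < h) (h0w : 0 < w) (h0r : 0 ≤ r0) (h0c : 0 ≤ c0) (hCw : C < c0 + w)
    (g : List (List String)) (hRlen : R ≤ (g.length : Int))
    (hrows : ∀ r' : Nat, r' < g.length → C ≤ ((g.getD r' []).length : Int)) :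
    pvA_loopI vT roomSize dv key g (PySem.List.pyRange 0 h 1) = some none := by
  rw [PySem.List.pyRange_one_cons (by omega)]
  simp only [pvA_loopI, hr0, hR]
  by_cases hfail : R ≤ r0 + 0
  · rw [if_pos (Or.inl hfail)]
  · rw [if_neg (by omega)]
    simp only [hw]
    have hlen : (r0 + 0).toNat < g.length := by omega
    have hrow : C ≤ (((g.getD (r0 + 0).toNat []).length : Nat) : Int) := hrows _ hlen
    rw [pvA_loopJ_bound vT roomSize key 0 r0 c0 C w hc0 hC hr0 le_rfl (by omega) h0c hCw
      w.toNat 0 g (by omega) (by omega) (by omega) hlen hrow]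

theorem pvA_loopI_rows_fail (vT roomSize dv : List String) (key : String) (r0 R c0 C w h : Int)
    (hr0 : pvIntAt vT 0 = some r0) (hR : pvIntAt roomSize 0 = some R)
    (hc0 : pvIntAt vT 1 = some c0) (hC : pvIntAt roomSize 1 = some C)
    (hw : pvIntAt dv 1 = some w)
    (h0w : 0 < w) (h0r : 0 ≤ r0) (h0c : 0 ≤ c0) (hCw : c0 + w ≤ C) :
    ∀ (m : Nat) (a : Int) (g : List (List String)), 0 ≤ a → a + (m : Int) = h →
      r0 + a ≤ R → R < r0 + h →
      R ≤ (g.length : Int) →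
      (∀ r' : Nat, r' < g.length → C ≤ ((g.getD r' []).length : Int)) →
      pvA_loopI vT roomSize dv key g (PySem.List.pyRange a h 1) = some none := by
  intro m
  induction m with
  | zero => intro a g ha ham hle hlt _ _; omega
  | succ m ih =>
    intro a g ha ham hle hlt hRlen hrows
    rw [PySem.List.pyRange_one_cons (by omega)]
    simp only [pvA_loopI, hr0, hR]
    by_cases hfail : R ≤ r0 + a
    · rw [if_pos (Or.inl hfail)]
    · rw [if_neg (by omega)]
      simp only [hw]
      have hlen : (r0 + a).toNat < g.length := by omega
      have hrow : C ≤ (((g.getD (r0 + a).toNat []).length : Nat) : Int) := hrows _ hlen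
      by_cases hcl : ∀ k, k < w.toNat → pvCellN g (r0 + a).toNat ((c0 + 0).toNat + k) = "0"
      · rw [pvA_loopJ_clean vT roomSize key a r0 c0 C w hc0 hC hr0 ha (by omega) h0c hCw
          w.toNat 0 g (by omega) (by omega) hlen hrow hcl]
        exact ih (a + 1) _ (by omega) (by omega) (by omega) hlt
          (by rw [length_pvWriteSegN]; exact hRlen)
          (by
            intro r' hr'
            rw [length_pvWriteSegN] at hr'
            have := rowlen_pvWriteSegN (r0 + a).toNat key r' w.toNat (c0 + 0).toNat g
            rw [this]
            exact hrows r' hr')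
      · simp only [not_forall] at hcl
        obtain ⟨k, hk, hne⟩ := hcl
        rw [pvA_loopJ_dirty vT roomSize key a r0 c0 C w hc0 hC hr0 ha (by omega) h0c hCw
          w.toNat 0 g (by omega) (by omega) hlen hrow ⟨k, hk, hne⟩]

theorem pvA_loopI_dirty (vT roomSize dv : List String) (key : String) (r0 R c0 C w h : Int)
    (hr0 : pvIntAt vT 0 = some r0) (hR : pvIntAt roomSize 0 = some R)
    (hc0 : pvIntAt vT 1 = some c0) (hC : pvIntAt roomSize 1 = some C)
    (hw : pvIntAt dv 1 = some w)
    (h0w : 0 < w) (h0r : 0 ≤ r0) (h0c : 0 ≤ c0) (hCw : c0 + w ≤ C) :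
    ∀ (m : Nat) (a : Int) (g : List (List String)), 0 ≤ a → a + (m : Int) = h →
      r0 + h ≤ R →
      R ≤ (g.length : Int) →
      (∀ r' : Nat, r' < g.length → C ≤ ((g.getD r' []).length : Int)) →
      (∃ ik, ik < m ∧ ∃ jk, jk < w.toNat ∧
        pvCellN g ((r0 + a).toNat + ik) (c0.toNat + jk) ≠ "0") →
      pvA_loopI vT roomSize dv key g (PySem.List.pyRange a h 1) = some none := by
  intro m
  induction m with
  | zero =>
    intro a g _ _ _ _ _ hd
    obtain ⟨ik, hik, _⟩ := hd
    omega
  | succ m ih =>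
    intro a g ha ham hhR hRlen hrows hd
    rw [PySem.List.pyRange_one_cons (by omega)]
    simp only [pvA_loopI, hr0, hR]
    rw [if_neg (by omega)]
    simp only [hw]
    have hlen : (r0 + a).toNat < g.length := by omega
    have hrow : C ≤ (((g.getD (r0 + a).toNat []).length : Nat) : Int) := hrows _ hlen
    by_cases hcl : ∀ k, k < w.toNat → pvCellN g (r0 + a).toNat ((c0 + 0).toNat + k) = "0"
    · rw [pvA_loopJ_clean vT roomSize key a r0 c0 C w hc0 hC hr0 ha (by omega) h0c hCw
        w.toNat 0 g (by omega) (by omega) hlen hrow hcl]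
      apply ih (a + 1) _ (by omega) (by omega) hhR
        (by rw [length_pvWriteSegN]; exact hRlen)
        (by
          intro r' hr'
          rw [length_pvWriteSegN] at hr'
          rw [rowlen_pvWriteSegN]
          exact hrows r' hr')
      obtain ⟨ik, hik, jk, hjk, hne⟩ := hd
      have hik0 : ik ≠ 0 := by
        intro hik0
        subst hik0
        have := hcl jk (by omega)
        have hcc : (c0 + 0).toNat + jk = c0.toNat + jk := by omega
        rw [hcc] at this
        simp only [Nat.add_zero] at hne
        exact hne this
      refine ⟨ik - 1, by omega, jk, hjk, ?_⟩
      have heq : (r0 + (a + 1)).toNat + (ik - 1) = (r0 + a).toNat + ik := by omega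
      rw [heq, pvCellN_pvWriteSegN_ne_row _ _ _ _ (by omega)]
      exact hne
    · simp only [not_forall] at hcl
      obtain ⟨k, hk, hne⟩ := hcl
      rw [pvA_loopJ_dirty vT roomSize key a r0 c0 C w hc0 hC hr0 ha (by omega) h0c hCw
        w.toNat 0 g (by omega) (by omega) hlen hrow ⟨k, hk, hne⟩]

theorem pvA_loopI_ok (vT roomSize dv : List String) (key : String) (r0 R c0 C w h : Int)
    (hr0 : pvIntAt vT 0 = some r0) (hR : pvIntAt roomSize 0 = some R)
    (hc0 : pvIntAt vT 1 = some c0) (hC : pvIntAt roomSize 1 = some C)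
    (hw : pvIntAt dv 1 = some w)
    (h0w : 0 < w) (h0r : 0 ≤ r0) (h0c : 0 ≤ c0) (hCw : c0 + w ≤ C) :
    ∀ (m : Nat) (a : Int) (g : List (List String)), 0 ≤ a → a + (m : Int) = h →
      r0 + h ≤ R →
      R ≤ (g.length : Int) →
      (∀ r' : Nat, r' < g.length → C ≤ ((g.getD r' []).length : Int)) →
      (∀ ik, ik < m → ∀ jk, jk < w.toNat →
        pvCellN g ((r0 + a).toNat + ik) (c0.toNat + jk) = "0") →
      pvA_loopI vT roomSize dv key g (PySem.List.pyRange a h 1) =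
        some (some (pvWriteBlockN g (r0 + a).toNat c0.toNat w.toNat key m)) := by
  intro m
  induction m with
  | zero =>
    intro a g ha ham _ _ _ _
    rw [PySem.List.pyRange_one_eq_nil (by omega)]
    rfl
  | succ m ih =>
    intro a g ha ham hhR hRlen hrows hcl
    rw [PySem.List.pyRange_one_cons (by omega)]
    simp only [pvA_loopI, hr0, hR]
    rw [if_neg (by omega)]
    simp only [hw]
    have hlen : (r0 + a).toNat < g.length := by omega
    have hrow : C ≤ (((g.getD (r0 + a).toNat []).length : Nat) : Int) := hrows _ hlen
    have hcl0 : ∀ k, k < w.toNat → pvCellN g (r0 + a).toNat ((c0 + 0).toNat + k) = "0" := by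
      intro k hk
      have hcc : (c0 + 0).toNat + k = c0.toNat + k := by omega
      rw [hcc]
      have := hcl 0 (by omega) k hk
      simpa using this
    rw [pvA_loopJ_clean vT roomSize key a r0 c0 C w hc0 hC hr0 ha (by omega) h0c hCw
      w.toNat 0 g (by omega) (by omega) hlen hrow hcl0]
    refine Eq.trans (b := pvA_loopI vT roomSize dv key
      (pvWriteSegN g (r0 + a).toNat (c0 + 0).toNat key w.toNat)
      (PySem.List.pyRange (a + 1) h 1)) rfl ?_
    rw [ih (a + 1) _ (by omega) (by omega) hhR
      (by rw [length_pvWriteSegN]; exact hRlen)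
      (by
        intro r' hr'
        rw [length_pvWriteSegN] at hr'
        rw [rowlen_pvWriteSegN]
        exact hrows r' hr')
      (by
        intro ik hik jk hjk
        have heq : (r0 + (a + 1)).toNat + ik = (r0 + a).toNat + (ik + 1) := by omega
        rw [heq, pvCellN_pvWriteSegN_ne_row _ _ _ _ (by omega)]
        exact hcl (ik + 1) (by omega) jk hjk)]
    have h1 : (r0 + (a + 1)).toNat = (r0 + a).toNat + 1 := by omega
    have h2 : (c0 + 0).toNat = c0.toNat := by omega
    simp only [pvWriteBlockN, h1, h2]

theorem pvA_loopI_fail0 (vT roomSize dv : List String) (key : String) (r0 R h : Int)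
    (hr0 : pvIntAt vT 0 = some r0) (hR : pvIntAt roomSize 0 = some R)
    (h0h : 0 < h) (hfr : R ≤ r0) (g : List (List String)) :
    pvA_loopI vT roomSize dv key g (PySem.List.pyRange 0 h 1) = some none := by
  rw [PySem.List.pyRange_one_cons (by omega)]
  simp only [pvA_loopI, hr0, hR]
  rw [if_pos (Or.inl (by omega))]

theorem pvA_loopI_wle_ok (vT roomSize dv : List String) (key : String) (r0 R w h : Int)
    (hr0 : pvIntAt vT 0 = some r0) (hR : pvIntAt roomSize 0 = some R)
    (hw : pvIntAt dv 1 = some w) (hwle : w ≤ 0) (h0r : 0 ≤ r0) :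
    ∀ (m : Nat) (a : Int) (g : List (List String)), 0 ≤ a → a + (m : Int) = h →
      r0 + h ≤ R →
      pvA_loopI vT roomSize dv key g (PySem.List.pyRange a h 1) = some (some g) := by
  intro m
  induction m with
  | zero =>
    intro a g ha ham _
    rw [PySem.List.pyRange_one_eq_nil (by omega)]
    rfl
  | succ m ih =>
    intro a g ha ham hfit
    rw [PySem.List.pyRange_one_cons (by omega)]
    simp only [pvA_loopI, hr0, hR]
    rw [if_neg (by omega)]
    simp only [hw]
    rw [PySem.List.pyRange_one_eq_nil (by omega : w ≤ (0 : Int))]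
    exact ih (a + 1) g (by omega) (by omega) hfit

-- ---- bridges between the two ports' views of the grid ----

theorem pvCellN_eq_getElem (g : List (List String)) (x y : Nat) (hx : x < g.length)
    (hy : y < g[x].length) : pvCellN g x y = g[x][y] := by
  unfold pvCellN
  rw [List.getD_eq_getElem _ _ hx, List.getD_eq_getElem _ _ hy]

theorem pvAnyB_empty (g : List (List String)) (r0 c0 h w R C : Int) (hd : h ≤ 0 ∨ w ≤ 0) :
    ((List.range h.toNat).any (fun i => (List.range w.toNat).any (fun j =>
      (!decide (0 ≤ r0 + (i : Int) ∧ r0 + (i : Int) < R ∧ 0 ≤ c0 + (j : Int) ∧ c0 + (j : Int) < C))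
      || (pvCellD g (r0 + (i : Int)) (c0 + (j : Int)) != "0")))) = false := by
  rcases hd with hd | hd
  · rw [show h.toNat = 0 by omega]; rfl
  · rw [show w.toNat = 0 by omega]; simp

theorem pvAnyB_of_bad (g : List (List String)) (r0 c0 h w R C : Int)
    (hh : 0 < h) (hw : 0 < w)
    (hbad : r0 < 0 ∨ R < r0 + h ∨ c0 < 0 ∨ C < c0 + w) :
    ((List.range h.toNat).any (fun i => (List.range w.toNat).any (fun j =>
      (!decide (0 ≤ r0 + (i : Int) ∧ r0 + (i : Int) < R ∧ 0 ≤ c0 + (j : Int) ∧ c0 + (j : Int) < C))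
      || (pvCellD g (r0 + (i : Int)) (c0 + (j : Int)) != "0")))) = true := by
  simp only [List.any_eq_true, List.mem_range]
  rcases hbad with hb | hb | hb | hb
  · exact ⟨0, by omega, 0, by omega, by
      rw [Bool.or_eq_true, Bool.not_eq_true', decide_eq_false_iff_not]
      exact Or.inl (by push_cast; omega)⟩
  · exact ⟨h.toNat - 1, by omega, 0, by omega, by
      rw [Bool.or_eq_true, Bool.not_eq_true', decide_eq_false_iff_not]
      exact Or.inl (by push_cast; omega)⟩
  · exact ⟨0, by omega, 0, by omega, by
      rw [Bool.or_eq_true, Bool.not_eq_true', decide_eq_false_iff_not]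
      exact Or.inl (by push_cast; omega)⟩
  · exact ⟨0, by omega, w.toNat - 1, by omega, by
      rw [Bool.or_eq_true, Bool.not_eq_true', decide_eq_false_iff_not]
      exact Or.inl (by push_cast; omega)⟩

theorem pvAnyB_iff_dirty (g : List (List String)) (r0 c0 h w R C : Int)
    (h0r : 0 ≤ r0) (h0c : 0 ≤ c0) (hrR : r0 + h ≤ R) (hcC : c0 + w ≤ C) :
    (((List.range h.toNat).any (fun i => (List.range w.toNat).any (fun j =>
      (!decide (0 ≤ r0 + (i : Int) ∧ r0 + (i : Int) < R ∧ 0 ≤ c0 + (j : Int) ∧ c0 + (j : Int) < C))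
      || (pvCellD g (r0 + (i : Int)) (c0 + (j : Int)) != "0")))) = true)
    ↔ ∃ ik, ik < h.toNat ∧ ∃ jk, jk < w.toNat ∧
        pvCellN g (r0.toNat + ik) (c0.toNat + jk) ≠ "0" := by
  simp only [List.any_eq_true, List.mem_range, Bool.or_eq_true, Bool.not_eq_true',
    decide_eq_false_iff_not, bne_iff_ne]
  constructor
  · rintro ⟨i, hi, j, hj, hc⟩
    rcases hc with hbnd | hc
    · exact absurd ⟨by omega, by omega, by omega, by omega⟩ hbnd
    · refine ⟨i, hi, j, hj, ?_⟩
      have e1 : (r0 + (i : Int)).toNat = r0.toNat + i := by omega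
      have e2 : (c0 + (j : Int)).toNat = c0.toNat + j := by omega
      rw [pvCellD_nonneg _ _ _ (by omega) (by omega), e1, e2] at hc
      exact hc
  · rintro ⟨i, hi, j, hj, hc⟩
    refine ⟨i, hi, j, hj, Or.inr ?_⟩
    have e1 : (r0 + (i : Int)).toNat = r0.toNat + i := by omega
    have e2 : (c0 + (j : Int)).toNat = c0.toNat + j := by omega
    rw [pvCellD_nonneg _ _ _ (by omega) (by omega), e1, e2]
    exact hc

theorem pvEnumMap_id (g : List (List String)) (kT : String) (r0 c0 h w : Int)
    (hd : h ≤ 0 ∨ w ≤ 0) :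
    ((PySem.List.enumerate g 0).map (fun p =>
      (PySem.List.enumerate p.2 0).map (fun q =>
        if r0 ≤ p.1 ∧ p.1 < r0 + h ∧ c0 ≤ q.1 ∧ q.1 < c0 + w then kT else q.2))) = g := by
  apply List.ext_getElem
  · rw [List.length_map, PySem.List.length_enumerate]
  · intro x hx1 hx2
    simp only [List.getElem_map, PySem.List.getElem_enumerate, zero_add]
    apply List.ext_getElem
    · rw [List.length_map, PySem.List.length_enumerate]
    · intro y hy1 hy2
      simp only [List.getElem_map, PySem.List.getElem_enumerate, zero_add]
      rw [if_neg (by omega)]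

theorem pvBlock_eq_map (g : List (List String)) (kT : String) (r0 c0 h w : Int)
    (h0r : 0 ≤ r0) (h0c : 0 ≤ c0) (h0h : 0 ≤ h) (h0w : 0 ≤ w) :
    pvWriteBlockN g r0.toNat c0.toNat w.toNat kT h.toNat =
      (PySem.List.enumerate g 0).map (fun p =>
        (PySem.List.enumerate p.2 0).map (fun q =>
          if r0 ≤ p.1 ∧ p.1 < r0 + h ∧ c0 ≤ q.1 ∧ q.1 < c0 + w then kT else q.2)) := by
  have hlen : (pvWriteBlockN g r0.toNat c0.toNat w.toNat kT h.toNat).length = g.length :=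
    length_pvWriteBlockN _ _ _ _ _ _
  apply List.ext_getElem
  · rw [hlen, List.length_map, PySem.List.length_enumerate]
  · intro x hx1 hx2
    have hxg : x < g.length := by rw [hlen] at hx1; exact hx1
    simp only [List.getElem_map, PySem.List.getElem_enumerate, zero_add]
    apply List.ext_getElem
    · rw [List.length_map, PySem.List.length_enumerate]
      rw [show (pvWriteBlockN g r0.toNat c0.toNat w.toNat kT h.toNat)[x] =
          (pvWriteBlockN g r0.toNat c0.toNat w.toNat kT h.toNat).getD x [] from
          (List.getD_eq_getElem _ _ hx1).symm]
      rw [rowlen_pvWriteBlockN, List.getD_eq_getElem _ _ hxg]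
    · intro y hy1 hy2
      simp only [List.getElem_map, PySem.List.getElem_enumerate, zero_add]
      have hyg : y < g[x].length := by
        rw [List.length_map, PySem.List.length_enumerate] at hy2
        exact hy2
      have hrowlen : y < (g.getD x []).length := by
        rw [List.getD_eq_getElem _ _ hxg]; exact hyg
      rw [show (pvWriteBlockN g r0.toNat c0.toNat w.toNat kT h.toNat)[x][y] =
          pvCellN (pvWriteBlockN g r0.toNat c0.toNat w.toNat kT h.toNat) x y from
          (pvCellN_eq_getElem _ x y hx1 hy1).symm]
      by_cases hin : r0 ≤ (x : Int) ∧ (x : Int) < r0 + h ∧ c0 ≤ (y : Int) ∧ (y : Int) < c0 + w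
      · rw [if_pos hin]
        exact pvCellN_pvWriteBlockN_in c0.toNat w.toNat kT x y h.toNat r0.toNat g
          (by omega) (by omega) (by omega) (by omega) hxg hrowlen
      · rw [if_neg hin]
        have hout : pvCellN (pvWriteBlockN g r0.toNat c0.toNat w.toNat kT h.toNat) x y =
            pvCellN g x y := by
          by_cases hrowin : r0.toNat ≤ x ∧ x < r0.toNat + h.toNat
          · exact pvCellN_pvWriteBlockN_out_col c0.toNat w.toNat kT x y (by omega)
              h.toNat r0.toNat g
          · exact pvCellN_pvWriteBlockN_out_row c0.toNat w.toNat kT x y h.toNat r0.toNat g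
              (by omega)
        rw [hout, pvCellN_eq_getElem g x y hxg hyg]

-- ---- bridges between the ports' accessors and the library primitives D_ is stated with ----

theorem pvLookup_eq_lookup (dims : List (String × List String)) (k : String) :
    pvLookup dims k = List.lookup k dims := by
  induction dims with
  | nil => rfl
  | cons p rest ih =>
    obtain ⟨k', v⟩ := p
    by_cases h : k' = k
    · subst h; simp [pvLookup, List.lookup]
    · have hb : (k == k') = false := beq_eq_false_iff_ne.mpr (Ne.symm h)
      simp [pvLookup, List.lookup, h, ih, hb]

theorem pvIntAt_zero (xs : List String) :
    pvIntAt xs 0 = xs[0]?.bind PySem.Int.ofStr? := by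
  unfold pvIntAt
  rw [PySem.List.pyGet?_of_nonneg xs (by norm_num), show ((0 : Int).toNat) = 0 from rfl]
  cases xs[0]? <;> rfl

theorem pvIntAt_one (xs : List String) :
    pvIntAt xs 1 = xs[1]?.bind PySem.Int.ofStr? := by
  unfold pvIntAt
  rw [PySem.List.pyGet?_of_nonneg xs (by norm_num), show ((1 : Int).toNat) = 1 from rfl]
  cases xs[1]? <;> rfl

-- ---- main equivalence of the two bodies (outside the changed region) ----

theorem pvMain_eq (roomSize : List String) (createdMatrix : List (List String))
    (dimensions : List (String × List String)) (kT : String) (vT : List String)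
    (hpw : List.Pairwise (fun a b => a.1 ≠ b.1) dimensions)
    (hall : dimensions.all (fun p => if p.1 = kT then
        decide (kT.toList.length ≤ 1) && pvSafe roomSize createdMatrix p.2 vT
      else true) = true)
    (hnd : pvDiffCore roomSize createdMatrix dimensions kT vT = false) :
    pvA_main roomSize createdMatrix dimensions kT vT =
      pvB_main roomSize createdMatrix dimensions kT vT := by
  cases hlk : pvLookup dimensions kT with
  | none =>
    unfold pvA_main pvB_main
    rw [pvA_dims_skip _ _ _ _ _ _ ((pvLookup_eq_none_iff _ _).mp hlk), hlk]
  | some dv =>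
    obtain ⟨pre, post, hdec, hpre⟩ := pvLookup_eq_some _ _ _ hlk
    have hmem : (kT, dv) ∈ dimensions := by rw [hdec]; simp
    have hsafe : pvSafe roomSize createdMatrix dv vT = true := by
      have h1 := List.all_eq_true.mp hall (kT, dv) hmem
      rw [if_pos rfl] at h1
      exact ((Bool.and_eq_true _ _).mp h1).2
    have hpost : ∀ p ∈ post, p.1 ≠ kT := by
      intro p hp he
      have hpw' := hpw
      rw [hdec] at hpw'
      have h2 := (List.pairwise_append.mp hpw').2.1
      exact (List.pairwise_cons.mp h2).1 p hp he.symm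
    unfold pvSafe at hsafe
    cases hh1 : pvIntAt dv 0 with
    | none => rw [hh1] at hsafe; simp at hsafe
    | some h =>
    cases hh2 : pvIntAt dv 1 with
    | none => rw [hh1, hh2] at hsafe; simp at hsafe
    | some w =>
    cases hh3 : pvIntAt vT 0 with
    | none => rw [hh1, hh2, hh3] at hsafe; simp at hsafe
    | some r0 =>
    cases hh4 : pvIntAt vT 1 with
    | none => rw [hh1, hh2, hh3, hh4] at hsafe; simp at hsafe
    | some c0 =>
    cases hh5 : pvIntAt roomSize 0 with
    | none => rw [hh1, hh2, hh3, hh4, hh5] at hsafe; simp at hsafe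
    | some R =>
    cases hh6 : pvIntAt roomSize 1 with
    | none => rw [hh1, hh2, hh3, hh4, hh5, hh6] at hsafe; simp at hsafe
    | some C =>
    have hif : (if 0 < h ∧ 0 < w ∧ 0 ≤ r0 ∧ 0 ≤ c0 then
        decide (R ≤ (createdMatrix.length : Int)) &&
          createdMatrix.all (fun row => decide (C ≤ (row.length : Int)))
      else true) = true := by
      rw [hh1, hh2, hh3, hh4, hh5, hh6] at hsafe
      exact hsafe
    have hskip : pvA_dims vT roomSize kT dimensions (pvReplaceGrid kT createdMatrix) dimensions
        = pvA_dims vT roomSize kT dimensions (pvReplaceGrid kT createdMatrix)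
            ((kT, dv) :: post) := by
      conv_lhs => rw [hdec]
      rw [pvA_dims_append vT roomSize kT (pre ++ (kT, dv) :: post)
        (pvReplaceGrid kT createdMatrix) pre ((kT, dv) :: post) hpre]
      rw [← hdec]
    have hAstep : ∀ (res : Option (Option (List (List String)))),
        pvA_loopI vT roomSize dv kT (pvReplaceGrid kT createdMatrix)
          (PySem.List.pyRange 0 h 1) = res →
        pvA_main roomSize createdMatrix dimensions kT vT =
          (match res with | some (some g') => g' | _ => []) := by
      intro res hres
      unfold pvA_main
      rw [hskip]
      simp only [pvA_dims, if_true, hlk, hh1, hres]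
      cases res with
      | none => rfl
      | some o =>
        cases o with
        | none => rfl
        | some g' => simp only [pvA_dims_skip _ _ _ _ _ _ hpost]
    by_cases hh0 : h ≤ 0
    · have hloop : pvA_loopI vT roomSize dv kT (pvReplaceGrid kT createdMatrix)
          (PySem.List.pyRange 0 h 1) = some (some (pvReplaceGrid kT createdMatrix)) := by
        rw [PySem.List.pyRange_one_eq_nil (by omega)]; rfl
      rw [hAstep _ hloop]
      simp only [pvB_main, hlk, hh1, hh2, hh3, hh4, hh5, hh6]
      rw [if_neg (by
        rw [pvAnyB_empty (pvReplaceGrid kT createdMatrix) r0 c0 h w R C (Or.inl hh0)]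
        exact Bool.false_ne_true)]
      exact (pvEnumMap_id (pvReplaceGrid kT createdMatrix) kT r0 c0 h w (Or.inl hh0)).symm
    · by_cases hwle : w ≤ 0
      · by_cases hbad : r0 < 0 ∨ R < r0 + h
        · have hcm : createdMatrix = [] := by
            by_contra hcm
            have htrue : pvDiffCore roomSize createdMatrix dimensions kT vT = true := by
              unfold pvDiffCore
              simp only [← pvLookup_eq_lookup, ← pvIntAt_zero, ← pvIntAt_one,
                hlk, hh1, hh2, hh3, hh5, Option.elim_some]
              rw [decide_eq_true hcm, decide_eq_true (show (0 : Int) < h by omega),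
                decide_eq_true hwle]
              rcases hbad with hb | hb
              · rw [decide_eq_true hb]; rfl
              · rw [decide_eq_true hb]; simp
            rw [htrue] at hnd
            exact absurd hnd (by simp)
          have hloop : pvA_loopI vT roomSize dv kT (pvReplaceGrid kT createdMatrix)
              (PySem.List.pyRange 0 h 1) = some none := by
            by_cases hr0n : r0 < 0
            · exact pvA_loopI_neg vT roomSize dv kT r0 R h hh3 hh5 (by omega) hr0n _
            · have hb : R < r0 + h := by rcases hbad with hb | hb <;> omega
              by_cases hfr : R ≤ r0
              · exact pvA_loopI_fail0 vT roomSize dv kT r0 R h hh3 hh5 (by omega) hfr _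
              · exact pvA_loopI_wle_fail vT roomSize dv kT r0 R w h hh3 hh5 hh2 hwle
                  (by omega) h.toNat 0 _ (by omega) (by omega) (by omega) hb
          rw [hAstep _ hloop]
          simp only [pvB_main, hlk, hh1, hh2, hh3, hh4, hh5, hh6]
          rw [hcm]
          simp [pvReplaceGrid, PySem.List.enumerate_nil]
        · have hbad' : 0 ≤ r0 ∧ r0 + h ≤ R := by omega
          have hloop := pvA_loopI_wle_ok vT roomSize dv kT r0 R w h hh3 hh5 hh2 hwle
            hbad'.1 h.toNat 0 (pvReplaceGrid kT createdMatrix) (by omega) (by omega) hbad'.2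
          rw [hAstep _ hloop]
          simp only [pvB_main, hlk, hh1, hh2, hh3, hh4, hh5, hh6]
          rw [if_neg (by
            rw [pvAnyB_empty (pvReplaceGrid kT createdMatrix) r0 c0 h w R C (Or.inr hwle)]
            exact Bool.false_ne_true)]
          exact (pvEnumMap_id (pvReplaceGrid kT createdMatrix) kT r0 c0 h w (Or.inr hwle)).symm
      · by_cases hr0neg : r0 < 0
        · rw [hAstep _ (pvA_loopI_neg vT roomSize dv kT r0 R h hh3 hh5 (by omega) hr0neg _)]
          simp only [pvB_main, hlk, hh1, hh2, hh3, hh4, hh5, hh6]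
          rw [if_pos (pvAnyB_of_bad (pvReplaceGrid kT createdMatrix) r0 c0 h w R C
            (by omega) (by omega) (Or.inl hr0neg))]
        · by_cases hc0neg : c0 < 0
          · rw [hAstep _ (pvA_loopI_c0neg vT roomSize dv kT r0 R c0 C w h hh3 hh5 hh4 hh6 hh2
              (by omega) (by omega) (by omega) hc0neg _)]
            simp only [pvB_main, hlk, hh1, hh2, hh3, hh4, hh5, hh6]
            rw [if_pos (pvAnyB_of_bad (pvReplaceGrid kT createdMatrix) r0 c0 h w R C
              (by omega) (by omega) (Or.inr (Or.inr (Or.inl hc0neg))))]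
          · rw [if_pos ⟨by omega, by omega, by omega, by omega⟩] at hif
            obtain ⟨hb1, hb2⟩ := (Bool.and_eq_true _ _).mp hif
            have hGlen : (pvReplaceGrid kT createdMatrix).length = createdMatrix.length := by
              simp [pvReplaceGrid]
            have hRlen : R ≤ ((pvReplaceGrid kT createdMatrix).length : Int) := by
              rw [hGlen]; exact of_decide_eq_true hb1
            have hrows : ∀ r' : Nat, r' < (pvReplaceGrid kT createdMatrix).length →
                C ≤ (((pvReplaceGrid kT createdMatrix).getD r' []).length : Int) := by
              intro r' hr'
              rw [hGlen] at hr'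
              have hmap : (pvReplaceGrid kT createdMatrix).getD r' [] =
                  (createdMatrix[r']).map (fun cell => PySem.Str.replace cell kT "0") := by
                unfold pvReplaceGrid
                rw [List.getD_eq_getElem _ _ (by simpa using hr'), List.getElem_map]
              rw [hmap, List.length_map]
              have := List.all_eq_true.mp hb2 createdMatrix[r'] (List.getElem_mem hr')
              exact of_decide_eq_true this
            by_cases hcb : C < c0 + w
            · rw [hAstep _ (pvA_loopI_colbound vT roomSize dv kT r0 R c0 C w h hh3 hh5 hh4 hh6
                hh2 (by omega) (by omega) (by omega) (by omega) hcb
                (pvReplaceGrid kT createdMatrix) hRlen hrows)]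
              simp only [pvB_main, hlk, hh1, hh2, hh3, hh4, hh5, hh6]
              rw [if_pos (pvAnyB_of_bad (pvReplaceGrid kT createdMatrix) r0 c0 h w R C
                (by omega) (by omega) (Or.inr (Or.inr (Or.inr hcb))))]
            · by_cases hrfit : R < r0 + h
              · have hloop : pvA_loopI vT roomSize dv kT (pvReplaceGrid kT createdMatrix)
                    (PySem.List.pyRange 0 h 1) = some none := by
                  by_cases hfr : R ≤ r0
                  · exact pvA_loopI_fail0 vT roomSize dv kT r0 R h hh3 hh5 (by omega) hfr _
                  · exact pvA_loopI_rows_fail vT roomSize dv kT r0 R c0 C w h hh3 hh5 hh4 hh6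
                      hh2 (by omega) (by omega) (by omega) (by omega) h.toNat 0 _
                      (by omega) (by omega) (by omega) hrfit hRlen hrows
                rw [hAstep _ hloop]
                simp only [pvB_main, hlk, hh1, hh2, hh3, hh4, hh5, hh6]
                rw [if_pos (pvAnyB_of_bad (pvReplaceGrid kT createdMatrix) r0 c0 h w R C
                  (by omega) (by omega) (Or.inr (Or.inl hrfit)))]
              · by_cases hAny : ((List.range h.toNat).any (fun i =>
                    (List.range w.toNat).any (fun j =>
                      (!decide (0 ≤ r0 + (i : Int) ∧ r0 + (i : Int) < R ∧
                        0 ≤ c0 + (j : Int) ∧ c0 + (j : Int) < C))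
                      || (pvCellD (pvReplaceGrid kT createdMatrix)
                          (r0 + (i : Int)) (c0 + (j : Int)) != "0")))) = true
                · obtain ⟨ik, hik, jk, hjk, hne⟩ :=
                    (pvAnyB_iff_dirty (pvReplaceGrid kT createdMatrix) r0 c0 h w R C
                      (by omega) (by omega) (by omega) (by omega)).mp hAny
                  have hloop := pvA_loopI_dirty vT roomSize dv kT r0 R c0 C w h hh3 hh5 hh4 hh6
                    hh2 (by omega) (by omega) (by omega) (by omega) h.toNat 0
                    (pvReplaceGrid kT createdMatrix) (by omega) (by omega) (by omega)
                    hRlen hrows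
                    ⟨ik, hik, jk, hjk, by
                      rw [show (r0 + (0 : Int)).toNat = r0.toNat from by omega]
                      exact hne⟩
                  rw [hAstep _ hloop]
                  simp only [pvB_main, hlk, hh1, hh2, hh3, hh4, hh5, hh6]
                  rw [if_pos hAny]
                · have hAll : ∀ ik, ik < h.toNat → ∀ jk, jk < w.toNat →
                      pvCellN (pvReplaceGrid kT createdMatrix)
                        ((r0 + (0 : Int)).toNat + ik) (c0.toNat + jk) = "0" := by
                    intro ik hik jk hjk
                    by_contra hcne
                    rw [show (r0 + (0 : Int)).toNat = r0.toNat from by omega] at hcne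
                    exact hAny ((pvAnyB_iff_dirty (pvReplaceGrid kT createdMatrix) r0 c0 h w R C
                      (by omega) (by omega) (by omega) (by omega)).mpr
                      ⟨ik, hik, jk, hjk, hcne⟩)
                  have hloop := pvA_loopI_ok vT roomSize dv kT r0 R c0 C w h hh3 hh5 hh4 hh6
                    hh2 (by omega) (by omega) (by omega) (by omega) h.toNat 0
                    (pvReplaceGrid kT createdMatrix) (by omega) (by omega) (by omega)
                    hRlen hrows hAll
                  rw [hAstep _ hloop]
                  simp only [pvB_main, hlk, hh1, hh2, hh3, hh4, hh5, hh6]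
                  rw [if_neg hAny]
                  rw [show (r0 + (0 : Int)).toNat = r0.toNat from by omega]
                  exact pvBlock_eq_map (pvReplaceGrid kT createdMatrix) kT r0 c0 h w
                    (by omega) (by omega) (by omega) (by omega)

-- ===== VERDICT (by name: the statements are the Claim_ definitions above) =====
theorem create_matrix_with_new_point_spec : Claim_unchanged_create_matrix_with_new_point := by
  unfold Claim_unchanged_create_matrix_with_new_point
  intro roomSize createdMatrix dimensions target _hdom hpre
  obtain ⟨hne, hpw, hpreB⟩ := hpre
  unfold Spec_create_matrix_with_new_point
  intro hnd
  cases hlast : target.getLast? with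
  | none => exact absurd (List.getLast?_eq_none_iff.mp hlast) hne
  | some kv =>
    obtain ⟨kT, vT⟩ := kv
    have hndC : pvDiffCore roomSize createdMatrix dimensions kT vT = false := by
      by_cases hb : pvDiffCore roomSize createdMatrix dimensions kT vT = true
      · exact absurd (show D_create_matrix_with_new_point roomSize createdMatrix dimensions target by
          unfold D_create_matrix_with_new_point pvDiffB
          rw [hlast, Option.elim_some]
          exact hb) hnd
      · exact Bool.eq_false_iff.mpr hb
    unfold create_matrix_with_new_point create_matrix_with_new_point_alt
    rw [hlast]
    show pvA_main roomSize createdMatrix dimensions kT vT =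
      pvB_main roomSize createdMatrix dimensions kT vT
    apply pvMain_eq _ _ _ _ _ hpw _ hndC
    unfold pvPreB at hpreB
    rw [hlast] at hpreB
    exact hpreB

theorem create_matrix_with_new_point_changed : Claim_changed_create_matrix_with_new_point := by
  unfold Claim_changed_create_matrix_with_new_point
  decide

theorem create_matrix_with_new_point_tight : Claim_exact_create_matrix_with_new_point := by
  unfold Claim_exact_create_matrix_with_new_point
  intro roomSize createdMatrix dimensions target _hdom hpre hd
  obtain ⟨hne, hpw, hpreB⟩ := hpre
  unfold D_create_matrix_with_new_point pvDiffB at hd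
  cases hlast : target.getLast? with
  | none => rw [hlast] at hd; exact absurd hd (by simp)
  | some kv =>
    obtain ⟨kT, vT⟩ := kv
    rw [hlast, Option.elim_some] at hd
    unfold pvDiffCore at hd
    obtain ⟨hcm', hrest⟩ := (Bool.and_eq_true _ _).mp hd
    have hcm : createdMatrix ≠ [] := of_decide_eq_true hcm'
    simp only [← pvLookup_eq_lookup, ← pvIntAt_zero, ← pvIntAt_one] at hrest
    cases hlk : pvLookup dimensions kT with
    | none => rw [hlk] at hrest; exact absurd hrest (by simp)
    | some dv =>
    rw [hlk, Option.elim_some] at hrest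
    -- Pre_ supplies all six parses for the matching entry
    obtain ⟨pre, post, hdec, hpre'⟩ := pvLookup_eq_some _ _ _ hlk
    have hmem : (kT, dv) ∈ dimensions := by rw [hdec]; simp
    have hsafe : pvSafe roomSize createdMatrix dv vT = true := by
      unfold pvPreB at hpreB
      rw [hlast] at hpreB
      have h1 := List.all_eq_true.mp hpreB (kT, dv) hmem
      rw [if_pos rfl] at h1
      exact ((Bool.and_eq_true _ _).mp h1).2
    unfold pvSafe at hsafe
    cases hh1 : pvIntAt dv 0 with
    | none => rw [hh1] at hsafe; simp at hsafe
    | some h =>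
    cases hh2 : pvIntAt dv 1 with
    | none => rw [hh1, hh2] at hsafe; simp at hsafe
    | some w =>
    cases hh3 : pvIntAt vT 0 with
    | none => rw [hh1, hh2, hh3] at hsafe; simp at hsafe
    | some r0 =>
    cases hh4 : pvIntAt vT 1 with
    | none => rw [hh1, hh2, hh3, hh4] at hsafe; simp at hsafe
    | some c0 =>
    cases hh5 : pvIntAt roomSize 0 with
    | none => rw [hh1, hh2, hh3, hh4, hh5] at hsafe; simp at hsafe
    | some R =>
    cases hh6 : pvIntAt roomSize 1 with
    | none => rw [hh1, hh2, hh3, hh4, hh5, hh6] at hsafe; simp at hsafe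
    | some C =>
    simp only [hh1, hh2, hh3, hh5, Option.elim_some] at hrest
    rw [Bool.and_eq_true, Bool.and_eq_true, Bool.or_eq_true] at hrest
    obtain ⟨⟨hh', hwle'⟩, hbad'⟩ := hrest
    have hh : (0 : Int) < h := of_decide_eq_true hh'
    have hwle : w ≤ 0 := of_decide_eq_true hwle'
    have hbad : r0 < 0 ∨ R < r0 + h := by
      rcases hbad' with hb | hb
      exacts [Or.inl (of_decide_eq_true hb), Or.inr (of_decide_eq_true hb)]
    have hpost : ∀ p ∈ post, p.1 ≠ kT := by
      intro p hp he
      have hpw' := hpw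
      rw [hdec] at hpw'
      have h2 := (List.pairwise_append.mp hpw').2.1
      exact (List.pairwise_cons.mp h2).1 p hp he.symm
    -- A returns []
    have hloop : pvA_loopI vT roomSize dv kT (pvReplaceGrid kT createdMatrix)
        (PySem.List.pyRange 0 h 1) = some none := by
      by_cases hr0n : r0 < 0
      · exact pvA_loopI_neg vT roomSize dv kT r0 R h hh3 hh5 (by omega) hr0n _
      · have hb : R < r0 + h := by rcases hbad with hb | hb <;> omega
        by_cases hfr : R ≤ r0
        · exact pvA_loopI_fail0 vT roomSize dv kT r0 R h hh3 hh5 (by omega) hfr _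
        · exact pvA_loopI_wle_fail vT roomSize dv kT r0 R w h hh3 hh5 hh2 hwle
            (by omega) h.toNat 0 _ (by omega) (by omega) (by omega) hb
    have hA : create_matrix_with_new_point roomSize createdMatrix dimensions target = [] := by
      unfold create_matrix_with_new_point
      rw [hlast]
      show pvA_main roomSize createdMatrix dimensions kT vT = []
      unfold pvA_main
      conv_lhs => rw [hdec]
      rw [pvA_dims_append vT roomSize kT (pre ++ (kT, dv) :: post)
        (pvReplaceGrid kT createdMatrix) pre ((kT, dv) :: post) hpre']
      rw [← hdec]
      simp only [pvA_dims, if_true, hlk, hh1, hloop]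
    -- B returns the cleared grid, which is non-empty
    have hB : create_matrix_with_new_point_alt roomSize createdMatrix dimensions target =
        pvReplaceGrid kT createdMatrix := by
      unfold create_matrix_with_new_point_alt
      rw [hlast]
      show pvB_main roomSize createdMatrix dimensions kT vT = pvReplaceGrid kT createdMatrix
      simp only [pvB_main, hlk, hh1, hh2, hh3, hh4, hh5, hh6]
      rw [if_neg (by
        rw [pvAnyB_empty (pvReplaceGrid kT createdMatrix) r0 c0 h w R C (Or.inr hwle)]
        exact Bool.false_ne_true)]
      exact pvEnumMap_id (pvReplaceGrid kT createdMatrix) kT r0 c0 h w (Or.inr hwle)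
    rw [hA, hB]
    intro heq
    apply hcm
    have hlen : (pvReplaceGrid kT createdMatrix).length = createdMatrix.length := by
      simp [pvReplaceGrid]
    have : createdMatrix.length = 0 := by rw [← hlen, ← heq]; rfl
    exact List.length_eq_zero_iff.mp this
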